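-- pv_equiv track=rewrite | github.com/mohammadi-milad-mim/Competitive-Programming | UICPC/14/SF.py | find_all_possible
-- ===== SOURCE A (Python) =====
-- from itertools import combinations as C
--
-- def find_all_possible(known):
--     possible = [False]*360
--     for x in known:
--         possible[x] = True
--
--     stack = []
--     cp = known.copy()
--     for a in cp:
--         t = (2*a) % 360
--         if not possible[t]:
--             stack.append(t)
--             known.add(t)
--             possible[t] = True
--
--     for a1,a2 in C(known,2):
--         t1 = (360+a1-a2)%360
--         t2 = (360+a2-a1)%360
--         t3 = (a1+a2) % 360
--         if not possible[t1]:
--             stack.append(t1)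
--             known.add(t1)
--             possible[t1] = True
--         if not possible[t2]:
--             stack.append(t2)
--             known.add(t2)
--             possible[t2] = True
--         if not possible[t3]:
--             stack.append(t3)
--             known.add(t3)
--             possible[t3] = True
--
--     while stack:
--         a1 = stack.pop()
--         t = (2*a1) % 360
--         if not possible[t]:
--             stack.append(t)
--             known.add(t)
--             possible[t] = True
--
--         cp = known.copy()
--         for a2 in known.copy():
--             t1 = (360+a1-a2)%360
--             t2 = (360+a2-a1)%360
--             t3 = (a1+a2) % 360
--             if not possible[t1]:
--                 stack.append(t1)
--                 known.add(t1)
--                 possible[t1] = True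
--             if not possible[t2]:
--                 stack.append(t2)
--                 known.add(t2)
--                 possible[t2] = True
--             if not possible[t3]:
--                 stack.append(t3)
--                 known.add(t3)
--                 possible[t3] = True
--
--     return possible
-- ===== SOURCE B (Python) =====
-- def find_all_possible(known):
--     # Reachable angles are exactly the multiples of gcd(all angles, 360).
--     if not known:
--         return [False] * 360
--     g = 360
--     for x in known:
--         r = x % 360
--         while r:
--             g, r = r, g % r
--     return [i % g == 0 for i in range(360)]
-- ===== Notes on version B (the rewrite author's own statement) =====
-- stated objective: faster
-- what changed: Replaces the worklist closure over sums/differences/doubles mod 360 with the number-theoretic characterisation: the reachable angles are exactly the multiples of gcd(all angles, 360), computed by one Euclid pass.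
-- crash fix: On sets containing an element outside [-360, 360) A raises IndexError (possible[x] out of range); B returns the gcd-generated indicator list there. — e.g. on find_all_possible([-361]): A raises IndexError, B returns [true, true, true, true, true, true, true, true, true, true, true, true, true, true, true, true, true, true, true, true…
import Mathlib
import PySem

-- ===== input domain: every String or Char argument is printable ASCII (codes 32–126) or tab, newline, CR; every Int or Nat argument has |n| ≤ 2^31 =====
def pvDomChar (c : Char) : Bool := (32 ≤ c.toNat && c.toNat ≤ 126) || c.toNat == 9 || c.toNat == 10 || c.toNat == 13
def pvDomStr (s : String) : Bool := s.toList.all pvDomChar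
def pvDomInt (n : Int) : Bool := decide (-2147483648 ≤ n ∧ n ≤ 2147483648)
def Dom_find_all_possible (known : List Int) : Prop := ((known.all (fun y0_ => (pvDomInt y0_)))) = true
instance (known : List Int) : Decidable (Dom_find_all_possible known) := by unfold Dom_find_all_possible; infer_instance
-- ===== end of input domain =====

set_option maxRecDepth 10000


-- B replaces A's worklist closure under sum/difference/double mod 360 by one Euclid pass:
-- the reachable angles are exactly the multiples of gcd(all angles, 360) (faster).
-- `known` is a Python set (List Int = its distinct elements).  A mutates that set in
-- place (it adds every newly reached angle); B does not — the equivalence proved here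
-- is about the RETURN value.

-- ===== PORT A =====
-- the shared `if not possible[t]: stack.append(t); known.add(t); possible[t] = True` block
-- (the added t is always fresh, so set-add is an append)
def pvMark (st : List Bool × List Int × List Int) (t : Int) : List Bool × List Int × List Int :=
  if PySem.List.pyGetD st.1 t false = false then
    (PySem.List.pySetD st.1 t true, st.2.1 ++ [t], st.2.2 ++ [t])
  else st

-- the three-target body shared by the combinations loop and the while loop
def pvMark3 (a1 : Int) (st : List Bool × List Int × List Int) (a2 : Int) :
    List Bool × List Int × List Int :=
  pvMark (pvMark (pvMark st (PySem.Int.mod (360 + a1 - a2) 360))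
      (PySem.Int.mod (360 + a2 - a1) 360))
    (PySem.Int.mod (a1 + a2) 360)

-- itertools.combinations(known, 2) materialised at call time
def pvComb2 : List Int → List (Int × Int)
  | [] => []
  | x :: xs => xs.map (fun y => (x, y)) ++ pvComb2 xs

-- the `while stack:` loop; fuel makes the recursion structural (a totality guard only:
-- each iteration pops one element and the proof shows the stack empties well inside it)
def pvWhileA : Nat → List Bool → List Int → List Int → List Bool
  | 0, possible, _, _ => possible
  | fuel + 1, possible, stack, kn =>
    match stack.getLast? with
    | none => possible
    | some a1 =>
      let stack' := stack.dropLast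
      let st := pvMark (possible, stack', kn) (PySem.Int.mod (2 * a1) 360)
      let st := st.2.2.foldl (pvMark3 a1) st
      pvWhileA fuel st.1 st.2.1 st.2.2

def find_all_possible (known : List Int) : List Bool :=
  let possible := known.foldl (fun p x => PySem.List.pySetD p x true) (List.replicate 360 false)
  let st := known.foldl (fun s a => pvMark s (PySem.Int.mod (2 * a) 360))
    (possible, ([] : List Int), known)
  let st := (pvComb2 st.2.2).foldl (fun s ab => pvMark3 ab.1 s ab.2) st
  pvWhileA 1000000 st.1 st.2.1 st.2.2

-- ===== PORT B =====
-- `while r: g, r = r, g % r`; the fuel r.toNat makes it structural (r strictly decreases)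
def pvGcdLoopF : Nat → Int → Int → Int
  | 0, g, _ => g
  | f + 1, g, r => if 0 < r then pvGcdLoopF f r (PySem.Int.mod g r) else g

def pvGcdLoop (g r : Int) : Int := pvGcdLoopF r.toNat g r

def find_all_possible_alt (known : List Int) : List Bool :=
  if known = [] then List.replicate 360 false
  else
    let g := known.foldl (fun g x => pvGcdLoop g (PySem.Int.mod x 360)) 360
    (PySem.List.pyRange 0 360 1).map (fun i => decide (PySem.Int.mod i g = 0))

-- ===== PRECONDITION & SPEC =====
-- Pre_ is exactly the set of inputs on which A returns normally: every element must be a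
-- usable index into the 360-slot table `possible` (otherwise A raises IndexError).
def Pre_find_all_possible (known : List Int) : Prop :=
  ∀ x ∈ known, -360 ≤ x ∧ x < 360
instance (known : List Int) : Decidable (Pre_find_all_possible known) := by
  unfold Pre_find_all_possible; infer_instance

def pvWitness_find_all_possible : List Int := [90, 45, -100]

-- On sets containing an element outside [-360, 360) A raises IndexError (possible[x] out of
-- range); B returns the gcd-generated indicator list there.
def Raises_find_all_possible (known : List Int) : Prop := ¬ Pre_find_all_possible known
instance (known : List Int) : Decidable (Raises_find_all_possible known) := by
  unfold Raises_find_all_possible; infer_instance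

def pvRaiseWitness_find_all_possible : List Int := [-361]
def pvRaiseWitnessOut_find_all_possible : List Bool :=
  [true, true, true, true, true, true, true, true, true, true, true, true, true, true, true, true, true, true, true, true, true, true, true, true, true, true, true, true, true, true, true, true, true, true, true, true, true, true, true, true, true, true, true, true, true, true, true, true, true, true, true, true, true, true, true, true, true, true, true, true, true, true, true, true, true, true, true, true, true, true, true, true, true, true, true, true, true, true, true, true, true, true, true, true, true, true, true, true, true, true, true, true, true, true, true, true, true, true, true, true, true, true, true, true, true, true, true, true, true, true, true, true, true, true, true, true, true, true, true, true, true, true, true, true, true, true, true, true, true, true, true, true, true, true, true, true, true, true, true, true, true, true, true, true, true, true, true, true, true, true, true, true, true, true, true, true, true, true, true, true, true, true, true, true, true, true, true, true, true, true, true, true, true, true, true, true, true, true, true, true, true, true, true, true, true, true, true, true, true, true, true, true, true, true, true, true, true, true, true, true, true, true, true, true, true, true, true, true, true, true, true, true, true, true, true, true, true, true, true, true, true, true, true, true, true, true, true, true, true, true, true, true, true, true, true, true, true, true, true, true, true, true, true, true, true, true, true, true, true, true, true, true, true, true, true, true, true, true, true, true, true, true, true, true, true, true, true, true, true, true, true,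 true, true, true, true, true, true, true, true, true, true, true, true, true, true, true, true, true, true, true, true, true, true, true, true, true, true, true, true, true, true, true, true, true, true, true, true, true, true, true, true, true, true, true, true, true, true, true, true, true, true, true, true, true, true, true, true, true, true, true, true, true, true, true, true, true, true, true, true, true, true, true, true, true, true, true, true, true, true, true, true, true, true, true, true, true, true, true, true, true]

def Spec_find_all_possible (known : List Int) (out : List Bool) : Prop :=
  out = find_all_possible_alt known
instance (known : List Int) (out : List Bool) : Decidable (Spec_find_all_possible known out) := by
  unfold Spec_find_all_possible; infer_instance

-- ===== CLAIM (what is proved, stated in full; the proofs are below) =====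
def Claim_equal_find_all_possible : Prop :=
  ∀ (known : List Int), Dom_find_all_possible known → Pre_find_all_possible known →
    Spec_find_all_possible known (find_all_possible known)

def Claim_raises_find_all_possible : Prop :=
  (∀ (known : List Int), Dom_find_all_possible known → Raises_find_all_possible known →
    ¬ Pre_find_all_possible known) ∧
  (Dom_find_all_possible pvRaiseWitness_find_all_possible ∧
    Raises_find_all_possible pvRaiseWitness_find_all_possible ∧
    find_all_possible_alt pvRaiseWitness_find_all_possible = pvRaiseWitnessOut_find_all_possible)

-- ===== LEMMAS AND PROOFS =====

-- proof-only abbreviations: residues, the indicator table after the first loop,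
-- the folded gcd, reachability, closure, and the worklist invariants
def pvRes (k : List Int) : List Int := k.map (fun x => x % 360)

def pvInd (known : List Int) : List Bool :=
  (PySem.List.pyRange 0 360 1).map (fun i => decide (i ∈ pvRes known))

def pvG (K0 : List Int) : Int :=
  K0.foldl (fun g x => pvGcdLoop g (PySem.Int.mod x 360)) 360

def pvS (b : List Int) (n : Int) : Prop := n % 360 ∈ pvRes b

def pvClosed (b : List Int) : Prop :=
  ∀ a ∈ b, ∀ c ∈ b, (a + c) % 360 ∈ pvRes b ∧ (a - c) % 360 ∈ pvRes b

def pvFalseC (p : List Bool) : Nat :=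
  ((Finset.range 360).filter (fun n => p.getD n false = false)).card

def pvMeas (st : List Bool × List Int × List Int) : Nat := st.2.1.length + pvFalseC st.1

-- core invariant of the worklist state (possible, stack, known)
def pvInvC (K0 : List Int) (st : List Bool × List Int × List Int) : Prop :=
  st.1.length = 360 ∧
  (∀ x ∈ st.2.2, -360 ≤ x ∧ x < 360) ∧
  (∀ x ∈ K0, x ∈ st.2.2) ∧
  (∀ n : Nat, n < 360 → (st.1.getD n false = true ↔ (n : Int) ∈ pvRes st.2.2)) ∧
  (∀ x ∈ st.2.1, x ∈ st.2.2) ∧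
  (∀ x ∈ st.2.2, pvG K0 ∣ x % 360)

-- "every pair of already-processed elements has been combined"
def pvH3 (st : List Bool × List Int × List Int) : Prop :=
  ∀ u ∈ st.2.2, ∀ v ∈ st.2.2, u ∉ st.2.1 → v ∉ st.2.1 →
    (u + v) % 360 ∈ pvRes st.2.2 ∧ ((u - v) % 360 ∈ pvRes st.2.2 ∨ u = v)

lemma pvMod360_eq (a : Int) : PySem.Int.mod a 360 = a % 360 :=
  PySem.Int.mod_eq_emod_of_pos (by norm_num)

lemma pvRes_self {k : List Int} {x : Int} (hx : x ∈ k) : x % 360 ∈ pvRes k :=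
  List.mem_map.2 ⟨x, hx, rfl⟩

lemma pvRes_append (k : List Int) (t : Int) (n : Int) :
    n ∈ pvRes (k ++ [t]) ↔ n ∈ pvRes k ∨ n = t % 360 := by
  simp [pvRes, or_comm]

-- divisibility helpers
lemma pvDvd_mod {g m : Int} (h360 : g ∣ 360) (hm : g ∣ m) : g ∣ m % 360 := by
  have h : m % 360 = m - 360 * (m / 360) := Int.emod_def m 360
  rw [h]
  exact dvd_sub hm (h360.mul_right _)

lemma pvDvd_of_mod {g x : Int} (h360 : g ∣ 360) (hx : g ∣ x % 360) : g ∣ x := by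
  have h : x = x % 360 + 360 * (x / 360) := by
    have := Int.emod_def x 360; omega
  rw [h]
  exact dvd_add hx (h360.mul_right _)

-- the Euclid loop of B: divisibility facts, by induction on the fuel
lemma pvGcdLoopF_succ (N : Nat) (g r : Int) :
    pvGcdLoopF (N + 1) g r = if 0 < r then pvGcdLoopF N r (PySem.Int.mod g r) else g := rfl

lemma pvGcdLoopF_dvd : ∀ (N : Nat) (g r : Int), r.toNat ≤ N → 0 < g → 0 ≤ r →
    0 < pvGcdLoopF N g r ∧ pvGcdLoopF N g r ∣ g ∧ pvGcdLoopF N g r ∣ r := by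
  intro N
  induction N with
  | zero =>
    intro g r hN hg hr
    have hr0 : r = 0 := by omega
    exact ⟨hg, dvd_refl g, hr0 ▸ dvd_zero g⟩
  | succ N ih =>
    intro g r hN hg hr
    rw [pvGcdLoopF_succ]
    by_cases h : 0 < r
    · simp only [if_pos h]
      have hmod : PySem.Int.mod g r = g % r := PySem.Int.mod_eq_emod_of_pos h
      have h1 : 0 ≤ g % r := Int.emod_nonneg g (by omega)
      have h2 : g % r < r := Int.emod_lt_of_pos g h
      rw [hmod]
      obtain ⟨hpos, hdr, hdm⟩ := ih r (g % r) (by omega) h h1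
      refine ⟨hpos, ?_, hdr⟩
      have hsum : pvGcdLoopF N r (g % r) ∣ g % r + r * (g / r) :=
        dvd_add hdm (Dvd.dvd.mul_right hdr _)
      rwa [Int.emod_add_ediv g r] at hsum
    · simp only [if_neg h]
      have hr0 : r = 0 := by omega
      exact ⟨hg, dvd_refl g, hr0 ▸ dvd_zero g⟩

lemma pvGcdLoop_dvd (g r : Int) (hg : 0 < g) (hr : 0 ≤ r) :
    0 < pvGcdLoop g r ∧ pvGcdLoop g r ∣ g ∧ pvGcdLoop g r ∣ r :=
  pvGcdLoopF_dvd r.toNat g r (le_refl _) hg hr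

lemma pvFoldGcd_dvd (l : List Int) : ∀ g0 : Int, 0 < g0 →
    0 < l.foldl (fun g x => pvGcdLoop g (PySem.Int.mod x 360)) g0 ∧
    l.foldl (fun g x => pvGcdLoop g (PySem.Int.mod x 360)) g0 ∣ g0 ∧
    ∀ x ∈ l, l.foldl (fun g x => pvGcdLoop g (PySem.Int.mod x 360)) g0 ∣ x % 360 := by
  induction l with
  | nil => intro g0 hg0; simp [hg0]
  | cons x l ih =>
    intro g0 hg0
    simp only [List.foldl_cons]
    have hmod : PySem.Int.mod x 360 = x % 360 := pvMod360_eq x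
    have hb : 0 ≤ x % 360 := Int.emod_nonneg x (by norm_num)
    obtain ⟨hpos, hdvdg, hdvdr⟩ := pvGcdLoop_dvd g0 (x % 360) hg0 (by omega)
    rw [hmod] at *
    obtain ⟨Hpos, Hdvd, Hall⟩ := ih (pvGcdLoop g0 (x % 360)) hpos
    refine ⟨Hpos, Hdvd.trans hdvdg, ?_⟩
    intro y hy
    rcases List.mem_cons.1 hy with rfl | hy
    · exact Hdvd.trans hdvdr
    · exact Hall y hy

lemma pvG_dvd_360 (K0 : List Int) : pvG K0 ∣ 360 := (pvFoldGcd_dvd K0 360 (by norm_num)).2.1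

lemma pvG_dvd_mem (K0 : List Int) {x : Int} (hx : x ∈ K0) : pvG K0 ∣ x % 360 :=
  (pvFoldGcd_dvd K0 360 (by norm_num)).2.2 x hx

-- reachability pvS: closed lists are closed under the group operations
lemma pvS_add {b : List Int} (hcl : pvClosed b) {m n : Int}
    (hm : pvS b m) (hn : pvS b n) : pvS b (m + n) := by
  rcases List.mem_map.1 hm with ⟨a, ha, hae⟩
  rcases List.mem_map.1 hn with ⟨c, hc, hce⟩
  have h : (m + n) % 360 = (a + c) % 360 := by omega
  unfold pvS
  rw [h]
  exact (hcl a ha c hc).1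

lemma pvS_zero {b : List Int} (hcl : pvClosed b) (hne : b ≠ []) : pvS b 0 := by
  rcases List.exists_mem_of_ne_nil b hne with ⟨a, ha⟩
  have := (hcl a ha a ha).2
  unfold pvS
  simpa using this

lemma pvS_sub {b : List Int} (hcl : pvClosed b) {m n : Int}
    (hm : pvS b m) (hn : pvS b n) : pvS b (m - n) := by
  rcases List.mem_map.1 hm with ⟨a, ha, hae⟩
  rcases List.mem_map.1 hn with ⟨c, hc, hce⟩
  have h : (m - n) % 360 = (a - c) % 360 := by omega
  unfold pvS
  rw [h]
  exact (hcl a ha c hc).2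

lemma pvS_mul {b : List Int} (hcl : pvClosed b) (hne : b ≠ [])
    (k : Int) {n : Int} (hn : pvS b n) : pvS b (k * n) := by
  induction k using Int.induction_on with
  | zero => simpa using pvS_zero hcl hne
  | succ i ih =>
    have := pvS_add hcl ih hn
    simpa [add_mul] using this
  | pred i ih =>
    have := pvS_sub hcl ih hn
    simpa [sub_mul] using this

lemma pvS_gcdLoopF {b : List Int} (hcl : pvClosed b) (hne : b ≠ []) :
    ∀ (N : Nat) (g r : Int), pvS b g → pvS b r → pvS b (pvGcdLoopF N g r) := by
  intro N
  induction N with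
  | zero => intro g r hg hr; exact hg
  | succ N ih =>
    intro g r hg hr
    rw [pvGcdLoopF_succ]
    by_cases h : 0 < r
    · rw [if_pos h]
      have hmod : PySem.Int.mod g r = g % r := PySem.Int.mod_eq_emod_of_pos h
      have hS : pvS b (g % r) := by
        have h2 : g % r = g - r * (g / r) := Int.emod_def g r
        rw [h2]
        exact pvS_sub hcl hg (by simpa [mul_comm] using pvS_mul hcl hne (g / r) hr)
      rw [hmod]
      exact ih r (g % r) hr hS
    · rw [if_neg h]
      exact hg

lemma pvFoldGcd_S {b : List Int} (hcl : pvClosed b) (hne : b ≠ []) :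
    ∀ (l : List Int), (∀ x ∈ l, x % 360 ∈ pvRes b) → ∀ g0 : Int, pvS b g0 →
      pvS b (l.foldl (fun g x => pvGcdLoop g (PySem.Int.mod x 360)) g0) := by
  intro l
  induction l with
  | nil => intro _ g0 hg0; simpa using hg0
  | cons x l ih =>
    intro hsub g0 hg0
    simp only [List.foldl_cons]
    have hmod : PySem.Int.mod x 360 = x % 360 := pvMod360_eq x
    have hxS : pvS b (x % 360) := by
      unfold pvS
      simp only [Int.emod_emod_of_dvd _ (dvd_refl 360)]
      exact hsub x (by simp)
    refine ih (fun y hy => hsub y (by simp [hy])) _ ?_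
    unfold pvGcdLoop
    rw [hmod]
    exact pvS_gcdLoopF hcl hne _ g0 (x % 360) hg0 hxS

-- a nonempty list closed under sums mod 360 reaches 0 (iterate a single element 360 times)
lemma pvZero_sum {k : List Int} (hne : k ≠ [])
    (hsum : ∀ u ∈ k, ∀ v ∈ k, (u + v) % 360 ∈ pvRes k) : (0 : Int) ∈ pvRes k := by
  rcases List.exists_mem_of_ne_nil k hne with ⟨a, ha⟩
  have key : ∀ n : Nat, ((n + 1 : Int) * a) % 360 ∈ pvRes k := by
    intro n
    induction n with
    | zero => simpa using pvRes_self ha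
    | succ n ih =>
      rcases List.mem_map.1 ih with ⟨x, hx, hxe⟩
      have h2 : (x + a) % 360 = ((n + 1 + 1 : Int) * a) % 360 := by
        have e : (n + 1 + 1 : Int) * a = (n + 1 : Int) * a + a := by ring
        rw [e, Int.add_emod ((n+1 : Int) * a) a, ← hxe, ← Int.add_emod]
      have := hsum x hx a ha
      rwa [h2] at this
  have h360 := key 359
  push_cast at h360
  have e : (360 : Int) * a % 360 = 0 := Int.mul_emod_right 360 a
  rwa [e] at h360

-- the number-theoretic heart: in a closed superset of K0, residue-membership ↔ pvG K0 ∣ ·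
lemma pvMain_iff {K0 kf : List Int} (hne : K0 ≠ []) (hcl : pvClosed kf)
    (hsub : ∀ x ∈ K0, x ∈ kf) (hdvd : ∀ x ∈ kf, pvG K0 ∣ x % 360)
    (t : Int) (h0 : 0 ≤ t) (h1 : t < 360) : t ∈ pvRes kf ↔ pvG K0 ∣ t := by
  have hkfne : kf ≠ [] := by
    rcases List.exists_mem_of_ne_nil K0 hne with ⟨a, ha⟩
    exact List.ne_nil_of_mem (hsub a ha)
  constructor
  · intro ht
    rcases List.mem_map.1 ht with ⟨x, hx, rfl⟩
    exact hdvd x hx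
  · intro hd
    rcases hd with ⟨c, rfl⟩
    have hGS : pvS kf (pvG K0) := by
      refine pvFoldGcd_S hcl hkfne K0 (fun x hx => pvRes_self (hsub x hx)) 360 ?_
      simpa [pvS] using pvS_zero hcl hkfne
    have h : pvS kf (pvG K0 * c) := by
      simpa [mul_comm] using pvS_mul hcl hkfne c hGS
    unfold pvS at h
    rwa [Int.emod_eq_of_lt h0 h1] at h

-- ===== the first loop: possible becomes the indicator of the input residues =====
lemma pvSetD_mod (p : List Bool) (hp : p.length = 360) (x : Int)
    (h1 : -360 ≤ x) (h2 : x < 360) :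
    PySem.List.pySetD p x true = p.set (x % 360).toNat true := by
  by_cases hx : 0 ≤ x
  · rw [PySem.List.pySetD_of_nonneg p true hx]
    have h : x % 360 = x := Int.emod_eq_of_lt hx h2
    rw [h]
  · simp only [PySem.List.pySetD, PySem.List.pySet?, PySem.List.pyIdx?, hp]
    rw [if_neg hx]
    have hc : -((360 : Nat) : Int) ≤ x := by push_cast; omega
    rw [if_pos hc]
    simp only [Option.map_some, Option.getD_some]
    congr 1
    omega

lemma pvGetD_set (p : List Bool) (hp : p.length = 360) (j n : Nat) (hn : n < 360) :
    (p.set j true).getD n false = if j = n then true else p.getD n false := by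
  rw [List.getD_eq_getElem?_getD, List.getD_eq_getElem?_getD, List.getElem?_set]
  by_cases he : j = n
  · rw [if_pos he, if_pos he, hp, if_pos (by omega : j < 360)]
    rfl
  · rw [if_neg he, if_neg he]

lemma pvFoldSet_len (l : List Int) : ∀ p : List Bool,
    (l.foldl (fun p x => PySem.List.pySetD p x true) p).length = p.length := by
  induction l with
  | nil => simp
  | cons x l ih =>
    intro p
    simp only [List.foldl_cons]
    rw [ih, PySem.List.length_pySetD]

lemma pvFoldSet_getD (l : List Int) : ∀ p : List Bool, p.length = 360 →
    (∀ x ∈ l, -360 ≤ x ∧ x < 360) → ∀ t : Nat, t < 360 →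
    (l.foldl (fun p x => PySem.List.pySetD p x true) p).getD t false
      = (p.getD t false || decide ((t : Int) ∈ l.map (fun x => x % 360))) := by
  induction l with
  | nil => intro p hp _ t ht; simp
  | cons x l ih =>
    intro p hp hb t ht
    have hx := hb x (by simp)
    simp only [List.foldl_cons]
    rw [pvSetD_mod p hp x hx.1 hx.2]
    have hlen : (p.set (x % 360).toNat true).length = 360 := by
      rw [List.length_set, hp]
    rw [ih _ hlen (fun y hy => hb y (by simp [hy])) t ht]
    rw [pvGetD_set p hp (x % 360).toNat t ht]
    have hmem : ((t : Int) ∈ (x :: l).map (fun y => y % 360)) ↔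
        ((x % 360).toNat = t ∨ (t : Int) ∈ l.map (fun y => y % 360)) := by
      simp only [List.map_cons, List.mem_cons]
      constructor
      · rintro (h | h)
        · left; omega
        · right; exact h
      · rintro (h | h)
        · left; omega
        · right; exact h
    by_cases he : (x % 360).toNat = t
    · have hm : (t : Int) ∈ (x :: l).map (fun y => y % 360) := hmem.2 (Or.inl he)
      rw [if_pos he, decide_eq_true hm]
      simp
    · have hd : decide ((t : Int) ∈ (x :: l).map (fun y => y % 360))
          = decide ((t : Int) ∈ l.map (fun y => y % 360)) := by
        rw [decide_eq_decide, hmem]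
        simp [he]
      rw [if_neg he, hd]

lemma pvInd_len (known : List Int) : (pvInd known).length = 360 := by
  rw [pvInd, List.length_map, PySem.List.length_pyRange_one]
  rfl

lemma pvInd_getElem (known : List Int) (t : Nat) (ht : t < 360) :
    (pvInd known)[t]'(by rw [pvInd_len]; omega) = decide ((t : Int) ∈ pvRes known) := by
  simp only [pvInd, List.getElem_map, PySem.List.getElem_pyRange_one, zero_add]

lemma pvInd_getD (known : List Int) (t : Nat) (ht : t < 360) :
    (pvInd known).getD t false = decide ((t : Int) ∈ pvRes known) := by
  rw [List.getD_eq_getElem _ false (by rw [pvInd_len]; omega), pvInd_getElem known t ht]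

lemma pvFirstLoop (known : List Int) (hb : ∀ x ∈ known, -360 ≤ x ∧ x < 360) :
    known.foldl (fun p x => PySem.List.pySetD p x true) (List.replicate 360 false)
      = pvInd known := by
  apply List.ext_getElem
  · rw [pvFoldSet_len, List.length_replicate, pvInd_len]
  · intro t ht1 ht2
    have ht : t < 360 := by rw [pvFoldSet_len, List.length_replicate] at ht1; omega
    have h1 : (known.foldl (fun p x => PySem.List.pySetD p x true)
        (List.replicate 360 false)).getD t false = decide ((t : Int) ∈ pvRes known) := by
      rw [pvFoldSet_getD known _ (List.length_replicate) hb t ht]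
      rw [List.getD_eq_getElem?_getD, List.getElem?_replicate, if_pos ht]
      rw [pvRes]
      rfl
    rw [← List.getD_eq_getElem _ false, h1, ← pvInd_getD known t ht,
      List.getD_eq_getElem _ false]

-- ===== reads/writes at an in-range index =====
lemma pvRead (p : List Bool) (hp : p.length = 360) (t : Int) (h0 : 0 ≤ t) (h1 : t < 360) :
    PySem.List.pyGetD p t false = p.getD t.toNat false := by
  rw [PySem.List.pyGetD_eq_getElem p false h0 (by rw [hp]; exact_mod_cast h1),
    List.getD_eq_getElem _ false (by rw [hp]; omega)]

-- measure: marking a fresh cell trades one stack slot for one false cell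
lemma pvFalseC_le (p : List Bool) : pvFalseC p ≤ 360 :=
  le_trans (Finset.card_filter_le _ _) (by simp)

lemma pvFalseC_set (p : List Bool) (hp : p.length = 360) (n : Nat) (hn : n < 360)
    (hf : p.getD n false = false) : pvFalseC p = pvFalseC (p.set n true) + 1 := by
  have hmem : n ∈ (Finset.range 360).filter (fun m => p.getD m false = false) :=
    Finset.mem_filter.2 ⟨Finset.mem_range.2 hn, hf⟩
  have hfe : (Finset.range 360).filter (fun m => (p.set n true).getD m false = false)
      = ((Finset.range 360).filter (fun m => p.getD m false = false)).erase n := by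
    apply Finset.ext
    intro m
    rw [Finset.mem_filter, Finset.mem_erase, Finset.mem_filter]
    constructor
    · rintro ⟨hr, hm⟩
      have hm360 : m < 360 := Finset.mem_range.1 hr
      rw [pvGetD_set p hp n m hm360] at hm
      by_cases he : n = m
      · rw [if_pos he] at hm; exact absurd hm (by simp)
      · rw [if_neg he] at hm; exact ⟨fun h => he h.symm, hr, hm⟩
    · rintro ⟨hne, hr, hm⟩
      have hm360 : m < 360 := Finset.mem_range.1 hr
      refine ⟨hr, ?_⟩
      rw [pvGetD_set p hp n m hm360, if_neg (fun h => hne h.symm)]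
      exact hm
  unfold pvFalseC
  rw [hfe, Finset.card_erase_of_mem hmem]
  have hpos : 0 < ((Finset.range 360).filter (fun m => p.getD m false = false)).card :=
    Finset.card_pos.2 ⟨n, hmem⟩
  omega

-- ===== one pvMark step =====
lemma pvMark_step (K0 : List Int) (st : List Bool × List Int × List Int) (t : Int)
    (h0 : 0 ≤ t) (h1 : t < 360) (hdvd : pvG K0 ∣ t) (hC : pvInvC K0 st) :
    pvInvC K0 (pvMark st t) ∧
    (∀ x ∈ st.2.2, x ∈ (pvMark st t).2.2) ∧
    (∀ x ∈ st.2.1, x ∈ (pvMark st t).2.1) ∧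
    (∀ x ∈ (pvMark st t).2.2, x ∈ st.2.2 ∨ x ∈ (pvMark st t).2.1) ∧
    (∀ n : Int, n ∈ pvRes st.2.2 → n ∈ pvRes (pvMark st t).2.2) ∧
    t ∈ pvRes (pvMark st t).2.2 ∧
    pvMeas (pvMark st t) = pvMeas st := by
  obtain ⟨hlen, hbnd, hK0, hiff, hsk, hdv⟩ := hC
  have hread := pvRead st.1 hlen t h0 h1
  have htn : t.toNat < 360 := by omega
  have htc : ((t.toNat : Nat) : Int) = t := by omega
  have htm : t % 360 = t := Int.emod_eq_of_lt h0 h1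
  by_cases hb : PySem.List.pyGetD st.1 t false = false
  · have hm : pvMark st t
        = (PySem.List.pySetD st.1 t true, st.2.1 ++ [t], st.2.2 ++ [t]) := by
      rw [pvMark, if_pos hb]
    have hw : PySem.List.pySetD st.1 t true = st.1.set t.toNat true := by
      rw [pvSetD_mod st.1 hlen t (by omega) h1, htm]
    rw [hm, hw]
    refine ⟨⟨?_, ?_, ?_, ?_, ?_, ?_⟩, ?_, ?_, ?_, ?_, ?_, ?_⟩
    · simp [hlen]
    · intro x hx
      rcases List.mem_append.1 hx with hx | hx
      · exact hbnd x hx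
      · simp only [List.mem_singleton] at hx
        omega
    · intro x hx
      exact List.mem_append.2 (Or.inl (hK0 x hx))
    · intro n hn
      rw [pvGetD_set st.1 hlen t.toNat n hn, pvRes_append, htm]
      by_cases he : t.toNat = n
      · rw [if_pos he]
        constructor
        · intro _
          right
          omega
        · intro _
          rfl
      · rw [if_neg he]
        rw [hiff n hn]
        constructor
        · intro h
          exact Or.inl h
        · rintro (h | h)
          · exact h
          · exfalso; omega
    · intro x hx
      rcases List.mem_append.1 hx with hx | hx
      · exact List.mem_append.2 (Or.inl (hsk x hx))
      · exact List.mem_append.2 (Or.inr hx)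
    · intro x hx
      rcases List.mem_append.1 hx with hx | hx
      · exact hdv x hx
      · simp only [List.mem_singleton] at hx
        subst hx
        rw [htm]
        exact hdvd
    · intro x hx
      exact List.mem_append.2 (Or.inl hx)
    · intro x hx
      exact List.mem_append.2 (Or.inl hx)
    · intro x hx
      rcases List.mem_append.1 hx with hx | hx
      · exact Or.inl hx
      · exact Or.inr (List.mem_append.2 (Or.inr hx))
    · intro n hn
      rw [pvRes_append]
      exact Or.inl hn
    · rw [pvRes_append, htm]
      exact Or.inr rfl
    · have hf : st.1.getD t.toNat false = false := by rw [← hread]; exact hb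
      have := pvFalseC_set st.1 hlen t.toNat htn hf
      simp only [pvMeas, List.length_append, List.length_singleton]
      omega
  · have hm : pvMark st t = st := by rw [pvMark, if_neg hb]
    rw [hm]
    have htrue : st.1.getD t.toNat false = true := by
      rw [← hread]
      exact Bool.not_eq_false _ |>.mp hb
    have htres : t ∈ pvRes st.2.2 := by
      have := (hiff t.toNat htn).1 htrue
      rwa [htc] at this
    exact ⟨⟨hlen, hbnd, hK0, hiff, hsk, hdv⟩, fun x hx => hx, fun x hx => hx,
      fun x hx => Or.inl hx, fun n hn => hn, htres, rfl⟩

-- ===== one pvMark3 step =====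
lemma pvMark3_step (K0 : List Int) (st : List Bool × List Int × List Int) (a1 a2 : Int)
    (hd1 : pvG K0 ∣ a1 % 360) (hd2 : pvG K0 ∣ a2 % 360) (hC : pvInvC K0 st) :
    pvInvC K0 (pvMark3 a1 st a2) ∧
    (∀ x ∈ st.2.2, x ∈ (pvMark3 a1 st a2).2.2) ∧
    (∀ x ∈ st.2.1, x ∈ (pvMark3 a1 st a2).2.1) ∧
    (∀ x ∈ (pvMark3 a1 st a2).2.2, x ∈ st.2.2 ∨ x ∈ (pvMark3 a1 st a2).2.1) ∧
    (∀ n : Int, n ∈ pvRes st.2.2 → n ∈ pvRes (pvMark3 a1 st a2).2.2) ∧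
    (a1 + a2) % 360 ∈ pvRes (pvMark3 a1 st a2).2.2 ∧
    (a1 - a2) % 360 ∈ pvRes (pvMark3 a1 st a2).2.2 ∧
    (a2 - a1) % 360 ∈ pvRes (pvMark3 a1 st a2).2.2 ∧
    pvMeas (pvMark3 a1 st a2) = pvMeas st := by
  have h360 := pvG_dvd_360 K0
  have ha1 : pvG K0 ∣ a1 := pvDvd_of_mod h360 hd1
  have ha2 : pvG K0 ∣ a2 := pvDvd_of_mod h360 hd2
  have e1 : PySem.Int.mod (360 + a1 - a2) 360 = (a1 - a2) % 360 := by
    rw [pvMod360_eq]; omega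
  have e2 : PySem.Int.mod (360 + a2 - a1) 360 = (a2 - a1) % 360 := by
    rw [pvMod360_eq]; omega
  have e3 : PySem.Int.mod (a1 + a2) 360 = (a1 + a2) % 360 := pvMod360_eq _
  have hb1 : 0 ≤ (a1 - a2) % 360 ∧ (a1 - a2) % 360 < 360 :=
    ⟨Int.emod_nonneg _ (by norm_num), Int.emod_lt_of_pos _ (by norm_num)⟩
  have hb2 : 0 ≤ (a2 - a1) % 360 ∧ (a2 - a1) % 360 < 360 :=
    ⟨Int.emod_nonneg _ (by norm_num), Int.emod_lt_of_pos _ (by norm_num)⟩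
  have hb3 : 0 ≤ (a1 + a2) % 360 ∧ (a1 + a2) % 360 < 360 :=
    ⟨Int.emod_nonneg _ (by norm_num), Int.emod_lt_of_pos _ (by norm_num)⟩
  have hv1 : pvG K0 ∣ (a1 - a2) % 360 := pvDvd_mod h360 (dvd_sub ha1 ha2)
  have hv2 : pvG K0 ∣ (a2 - a1) % 360 := pvDvd_mod h360 (dvd_sub ha2 ha1)
  have hv3 : pvG K0 ∣ (a1 + a2) % 360 := pvDvd_mod h360 (dvd_add ha1 ha2)
  unfold pvMark3
  rw [e1, e2, e3]
  obtain ⟨C1, k1, s1, n1, r1, m1, q1⟩ :=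
    pvMark_step K0 st ((a1 - a2) % 360) hb1.1 hb1.2 hv1 hC
  obtain ⟨C2, k2, s2, n2, r2, m2, q2⟩ :=
    pvMark_step K0 _ ((a2 - a1) % 360) hb2.1 hb2.2 hv2 C1
  obtain ⟨C3, k3, s3, n3, r3, m3, q3⟩ :=
    pvMark_step K0 _ ((a1 + a2) % 360) hb3.1 hb3.2 hv3 C2
  refine ⟨C3, ?_, ?_, ?_, ?_, m3, r3 _ (r2 _ m1), r3 _ m2, ?_⟩
  · intro x hx
    exact k3 _ (k2 _ (k1 _ hx))
  · intro x hx
    exact s3 _ (s2 _ (s1 _ hx))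
  · intro x hx
    rcases n3 x hx with hx' | hx'
    · rcases n2 x hx' with hx'' | hx''
      · rcases n1 x hx'' with h | h
        · exact Or.inl h
        · exact Or.inr (s3 _ (s2 _ h))
      · exact Or.inr (s3 _ hx'')
    · exact Or.inr hx'
  · intro n hn
    exact r3 _ (r2 _ (r1 _ hn))
  · rw [q3, q2, q1]

-- pvComb2 membership facts
lemma pvMem_comb2 : ∀ (l : List Int) (p : Int × Int), p ∈ pvComb2 l → p.1 ∈ l ∧ p.2 ∈ l := by
  intro l
  induction l with
  | nil => intro p hp; simp [pvComb2] at hp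
  | cons x l ih =>
    intro p hp
    simp only [pvComb2, List.mem_append, List.mem_map] at hp
    rcases hp with ⟨y, hy, rfl⟩ | hp
    · exact ⟨by simp, by simp [hy]⟩
    · obtain ⟨h1, h2⟩ := ih p hp
      exact ⟨by simp [h1], by simp [h2]⟩

lemma pvComb2_cover : ∀ (l : List Int) (u v : Int), u ∈ l → v ∈ l → u ≠ v →
    (u, v) ∈ pvComb2 l ∨ (v, u) ∈ pvComb2 l := by
  intro l
  induction l with
  | nil => intro u v hu _ _; simp at hu
  | cons x l ih =>
    intro u v hu hv hne
    rcases List.mem_cons.1 hu with h | hu'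
    · rcases List.mem_cons.1 hv with h2 | hv'
      · exact absurd (h.trans h2.symm) hne
      · left
        rw [h]
        simp only [pvComb2, List.mem_append, List.mem_map]
        exact Or.inl ⟨v, hv', rfl⟩
    · rcases List.mem_cons.1 hv with h2 | hv'
      · right
        rw [h2]
        simp only [pvComb2, List.mem_append, List.mem_map]
        exact Or.inl ⟨u, hu', rfl⟩
      · rcases ih u v hu' hv' hne with h | h
        · left
          simp only [pvComb2, List.mem_append]
          exact Or.inr h
        · right
          simp only [pvComb2, List.mem_append]
          exact Or.inr h

-- ===== the doubling loop (loop 2) =====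
lemma pvLoop2_fold (K0 : List Int) :
    ∀ (l : List Int) (st : List Bool × List Int × List Int), pvInvC K0 st →
    (∀ a ∈ l, a ∈ st.2.2) →
    pvInvC K0 (l.foldl (fun s a => pvMark s (PySem.Int.mod (2 * a) 360)) st) ∧
    (∀ x ∈ st.2.2, x ∈ (l.foldl (fun s a => pvMark s (PySem.Int.mod (2 * a) 360)) st).2.2) ∧
    (∀ x ∈ st.2.1, x ∈ (l.foldl (fun s a => pvMark s (PySem.Int.mod (2 * a) 360)) st).2.1) ∧
    (∀ x ∈ (l.foldl (fun s a => pvMark s (PySem.Int.mod (2 * a) 360)) st).2.2,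
      x ∈ st.2.2 ∨ x ∈ (l.foldl (fun s a => pvMark s (PySem.Int.mod (2 * a) 360)) st).2.1) ∧
    (∀ n : Int, n ∈ pvRes st.2.2 →
      n ∈ pvRes (l.foldl (fun s a => pvMark s (PySem.Int.mod (2 * a) 360)) st).2.2) ∧
    (∀ a ∈ l, (2 * a) % 360
      ∈ pvRes (l.foldl (fun s a => pvMark s (PySem.Int.mod (2 * a) 360)) st).2.2) ∧
    pvMeas (l.foldl (fun s a => pvMark s (PySem.Int.mod (2 * a) 360)) st) = pvMeas st := by
  intro l
  induction l with
  | nil =>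
    intro st hC _
    exact ⟨hC, fun x hx => hx, fun x hx => hx, fun x hx => Or.inl hx, fun n hn => hn,
      by simp, rfl⟩
  | cons a l ih =>
    intro st hC hsub
    simp only [List.foldl_cons]
    have h360 := pvG_dvd_360 K0
    have hda : pvG K0 ∣ a % 360 := hC.2.2.2.2.2 a (hsub a (by simp))
    have ha : pvG K0 ∣ a := pvDvd_of_mod h360 hda
    have e : PySem.Int.mod (2 * a) 360 = (2 * a) % 360 := pvMod360_eq _
    have hb : 0 ≤ (2 * a) % 360 ∧ (2 * a) % 360 < 360 :=
      ⟨Int.emod_nonneg _ (by norm_num), Int.emod_lt_of_pos _ (by norm_num)⟩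
    have hv : pvG K0 ∣ (2 * a) % 360 := pvDvd_mod h360 (Dvd.dvd.mul_left ha 2)
    rw [e]
    obtain ⟨C1, k1, s1, n1, r1, m1, q1⟩ := pvMark_step K0 st ((2 * a) % 360) hb.1 hb.2 hv hC
    obtain ⟨C2, k2, s2, n2, r2, m2, q2⟩ :=
      ih (pvMark st ((2 * a) % 360)) C1 (fun a' ha' => k1 _ (hsub a' (by simp [ha'])))
    refine ⟨C2, fun x hx => k2 _ (k1 _ hx), fun x hx => s2 _ (s1 _ hx), ?_,
      fun n hn => r2 _ (r1 _ hn), ?_, by rw [q2, q1]⟩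
    · intro x hx
      rcases n2 x hx with hx' | hx'
      · rcases n1 x hx' with h | h
        · exact Or.inl h
        · exact Or.inr (s2 _ h)
      · exact Or.inr hx'
    · intro a' ha'
      rcases List.mem_cons.1 ha' with rfl | ha'
      · exact r2 _ m1
      · exact m2 a' ha'

-- ===== the combinations loop (loop 3) =====
lemma pvLoop3_fold (K0 : List Int) :
    ∀ (l : List (Int × Int)) (st : List Bool × List Int × List Int), pvInvC K0 st →
    (∀ pr ∈ l, pr.1 ∈ st.2.2 ∧ pr.2 ∈ st.2.2) →
    pvInvC K0 (l.foldl (fun s ab => pvMark3 ab.1 s ab.2) st) ∧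
    (∀ x ∈ st.2.2, x ∈ (l.foldl (fun s ab => pvMark3 ab.1 s ab.2) st).2.2) ∧
    (∀ x ∈ st.2.1, x ∈ (l.foldl (fun s ab => pvMark3 ab.1 s ab.2) st).2.1) ∧
    (∀ x ∈ (l.foldl (fun s ab => pvMark3 ab.1 s ab.2) st).2.2,
      x ∈ st.2.2 ∨ x ∈ (l.foldl (fun s ab => pvMark3 ab.1 s ab.2) st).2.1) ∧
    (∀ n : Int, n ∈ pvRes st.2.2 →
      n ∈ pvRes (l.foldl (fun s ab => pvMark3 ab.1 s ab.2) st).2.2) ∧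
    (∀ pr ∈ l,
      (pr.1 + pr.2) % 360 ∈ pvRes (l.foldl (fun s ab => pvMark3 ab.1 s ab.2) st).2.2 ∧
      (pr.1 - pr.2) % 360 ∈ pvRes (l.foldl (fun s ab => pvMark3 ab.1 s ab.2) st).2.2 ∧
      (pr.2 - pr.1) % 360 ∈ pvRes (l.foldl (fun s ab => pvMark3 ab.1 s ab.2) st).2.2) ∧
    pvMeas (l.foldl (fun s ab => pvMark3 ab.1 s ab.2) st) = pvMeas st := by
  intro l
  induction l with
  | nil =>
    intro st hC _
    exact ⟨hC, fun x hx => hx, fun x hx => hx, fun x hx => Or.inl hx, fun n hn => hn,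
      by simp, rfl⟩
  | cons ab l ih =>
    intro st hC hsub
    simp only [List.foldl_cons]
    have hd1 : pvG K0 ∣ ab.1 % 360 := hC.2.2.2.2.2 ab.1 (hsub ab (by simp)).1
    have hd2 : pvG K0 ∣ ab.2 % 360 := hC.2.2.2.2.2 ab.2 (hsub ab (by simp)).2
    obtain ⟨C1, k1, s1, n1, r1, ma, mb, mc, q1⟩ := pvMark3_step K0 st ab.1 ab.2 hd1 hd2 hC
    obtain ⟨C2, k2, s2, n2, r2, m2, q2⟩ :=
      ih (pvMark3 ab.1 st ab.2) C1
        (fun pr hpr => ⟨k1 _ (hsub pr (by simp [hpr])).1, k1 _ (hsub pr (by simp [hpr])).2⟩)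
    refine ⟨C2, fun x hx => k2 _ (k1 _ hx), fun x hx => s2 _ (s1 _ hx), ?_,
      fun n hn => r2 _ (r1 _ hn), ?_, by rw [q2, q1]⟩
    · intro x hx
      rcases n2 x hx with hx' | hx'
      · rcases n1 x hx' with h | h
        · exact Or.inl h
        · exact Or.inr (s2 _ h)
      · exact Or.inr hx'
    · intro pr hpr
      rcases List.mem_cons.1 hpr with rfl | hpr
      · exact ⟨r2 _ ma, r2 _ mb, r2 _ mc⟩
      · exact m2 pr hpr

-- ===== the inner for-loop of the while body =====
lemma pvBody_fold (K0 : List Int) (a1 : Int) (hd1 : pvG K0 ∣ a1 % 360) :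
    ∀ (l : List Int) (st : List Bool × List Int × List Int), pvInvC K0 st →
    (∀ v ∈ l, pvG K0 ∣ v % 360) →
    pvInvC K0 (l.foldl (pvMark3 a1) st) ∧
    (∀ x ∈ st.2.2, x ∈ (l.foldl (pvMark3 a1) st).2.2) ∧
    (∀ x ∈ st.2.1, x ∈ (l.foldl (pvMark3 a1) st).2.1) ∧
    (∀ x ∈ (l.foldl (pvMark3 a1) st).2.2,
      x ∈ st.2.2 ∨ x ∈ (l.foldl (pvMark3 a1) st).2.1) ∧
    (∀ n : Int, n ∈ pvRes st.2.2 → n ∈ pvRes (l.foldl (pvMark3 a1) st).2.2) ∧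
    (∀ v ∈ l,
      (a1 + v) % 360 ∈ pvRes (l.foldl (pvMark3 a1) st).2.2 ∧
      (a1 - v) % 360 ∈ pvRes (l.foldl (pvMark3 a1) st).2.2 ∧
      (v - a1) % 360 ∈ pvRes (l.foldl (pvMark3 a1) st).2.2) ∧
    pvMeas (l.foldl (pvMark3 a1) st) = pvMeas st := by
  intro l
  induction l with
  | nil =>
    intro st hC _
    exact ⟨hC, fun x hx => hx, fun x hx => hx, fun x hx => Or.inl hx, fun n hn => hn,
      by simp, rfl⟩
  | cons v l ih =>
    intro st hC hsub
    simp only [List.foldl_cons]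
    obtain ⟨C1, k1, s1, n1, r1, ma, mb, mc, q1⟩ :=
      pvMark3_step K0 st a1 v hd1 (hsub v (by simp)) hC
    obtain ⟨C2, k2, s2, n2, r2, m2, q2⟩ :=
      ih (pvMark3 a1 st v) C1 (fun v' hv' => hsub v' (by simp [hv']))
    refine ⟨C2, fun x hx => k2 _ (k1 _ hx), fun x hx => s2 _ (s1 _ hx), ?_,
      fun n hn => r2 _ (r1 _ hn), ?_, by rw [q2, q1]⟩
    · intro x hx
      rcases n2 x hx with hx' | hx'
      · rcases n1 x hx' with h | h
        · exact Or.inl h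
        · exact Or.inr (s2 _ h)
      · exact Or.inr hx'
    · intro v' hv'
      rcases List.mem_cons.1 hv' with rfl | hv'
      · exact ⟨r2 _ ma, r2 _ mb, r2 _ mc⟩
      · exact m2 v' hv'

-- unfolding equation for the while loop
lemma pvWhileA_succ (fuel : Nat) (p : List Bool) (s k : List Int) :
    pvWhileA (fuel + 1) p s k =
      match s.getLast? with
      | none => p
      | some a1 =>
        pvWhileA fuel
          (((pvMark (p, s.dropLast, k) (PySem.Int.mod (2 * a1) 360)).2.2.foldl (pvMark3 a1)
            (pvMark (p, s.dropLast, k) (PySem.Int.mod (2 * a1) 360))).1)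
          (((pvMark (p, s.dropLast, k) (PySem.Int.mod (2 * a1) 360)).2.2.foldl (pvMark3 a1)
            (pvMark (p, s.dropLast, k) (PySem.Int.mod (2 * a1) 360))).2.1)
          (((pvMark (p, s.dropLast, k) (PySem.Int.mod (2 * a1) 360)).2.2.foldl (pvMark3 a1)
            (pvMark (p, s.dropLast, k) (PySem.Int.mod (2 * a1) 360))).2.2) := rfl

-- ===== the while loop: runs to an empty stack and preserves the invariants =====
lemma pvWhile_main (K0 : List Int) :
    ∀ (fuel : Nat) (st : List Bool × List Int × List Int), pvInvC K0 st → pvH3 st →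
      pvMeas st < fuel →
      ∃ kf : List Int,
        pvInvC K0 (pvWhileA fuel st.1 st.2.1 st.2.2, [], kf) ∧
        pvH3 (pvWhileA fuel st.1 st.2.1 st.2.2, [], kf) := by
  intro fuel
  induction fuel with
  | zero => intro st _ _ h; omega
  | succ fuel ih =>
    intro st hC hH3 hM
    rcases hs : st.2.1.getLast? with _ | a1
    · have hnil : st.2.1 = [] := List.getLast?_eq_none_iff.1 hs
      have hcomp : pvWhileA (fuel + 1) st.1 st.2.1 st.2.2 = st.1 := by
        rw [pvWhileA_succ, hs]
      refine ⟨st.2.2, ?_, ?_⟩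
      · rw [hcomp, ← hnil]
        exact hC
      · rw [hcomp, ← hnil]
        exact hH3
    · -- pop a1, mark its double, then combine it with every element of the snapshot
      obtain ⟨s0, hsplit⟩ := List.getLast?_eq_some_iff.1 hs
      have hdrop : st.2.1.dropLast = s0 := by rw [hsplit]; simp
      have ha1s : a1 ∈ st.2.1 := by rw [hsplit]; simp
      have hmemS : ∀ x, x ∈ st.2.1 ↔ x ∈ s0 ∨ x = a1 := by
        intro x; rw [hsplit]; simp
      obtain ⟨hlen, hbnd, hK0, hiff, hsk, hdv⟩ := hC
      have ha1k : a1 ∈ st.2.2 := hsk a1 ha1s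
      have hd1 : pvG K0 ∣ a1 % 360 := hdv a1 ha1k
      have h360 := pvG_dvd_360 K0
      -- the popped state satisfies the core invariant
      have hCpop : pvInvC K0 (st.1, st.2.1.dropLast, st.2.2) := by
        refine ⟨hlen, hbnd, hK0, hiff, ?_, hdv⟩
        intro x hx
        simp only [hdrop] at hx
        exact hsk x ((hmemS x).2 (Or.inl hx))
      have e : PySem.Int.mod (2 * a1) 360 = (2 * a1) % 360 := pvMod360_eq _
      obtain ⟨Cd, kd, sd, nd, rd, md, qd⟩ :=
        pvMark_step K0 (st.1, st.2.1.dropLast, st.2.2) (PySem.Int.mod (2 * a1) 360)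
          (by rw [e]; exact Int.emod_nonneg _ (by norm_num))
          (by rw [e]; exact Int.emod_lt_of_pos _ (by norm_num))
          (by rw [e]; exact pvDvd_mod h360 (Dvd.dvd.mul_left (pvDvd_of_mod h360 hd1) 2)) hCpop
      obtain ⟨Cr, kr, sr, nr, rr, mr, qr⟩ :=
        pvBody_fold K0 a1 hd1
          ((pvMark (st.1, st.2.1.dropLast, st.2.2) (PySem.Int.mod (2 * a1) 360)).2.2)
          (pvMark (st.1, st.2.1.dropLast, st.2.2) (PySem.Int.mod (2 * a1) 360)) Cd
          (fun v hv => Cd.2.2.2.2.2 v hv)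
      -- the state after this whole iteration
      set std := pvMark (st.1, st.2.1.dropLast, st.2.2) (PySem.Int.mod (2 * a1) 360) with hstd
      set str := std.2.2.foldl (pvMark3 a1) std with hstr
      -- H3 is re-established: a1 was combined with the whole snapshot
      have hH3r : pvH3 str := by
        intro u hu v hv hus hvs
        have hud : u ∈ std.2.2 := by
          rcases nr u hu with h | h
          · exact h
          · exact absurd h hus
        have hvd : v ∈ std.2.2 := by
          rcases nr v hv with h | h
          · exact h
          · exact absurd h hvs
        by_cases hua : u = a1
        · subst hua
          obtain ⟨hsum, hdiff, _⟩ := mr v hvd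
          exact ⟨hsum, Or.inl hdiff⟩
        · by_cases hva : v = a1
          · subst hva
            obtain ⟨hsum, _, hdiff⟩ := mr u hud
            refine ⟨?_, Or.inl hdiff⟩
            rwa [add_comm] at hsum
          · -- neither is a1: both were processed before this iteration
            have huk : u ∈ st.2.2 := by
              rcases nd u hud with h | h
              · exact h
              · exact absurd (sr u h) hus
            have hvk : v ∈ st.2.2 := by
              rcases nd v hvd with h | h
              · exact h
              · exact absurd (sr v h) hvs
            have hus0 : u ∉ st.2.1 := by
              intro h
              rcases (hmemS u).1 h with h' | h'
              · exact hus (sr u (sd u (by rw [hdrop] at *; exact h')))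
              · exact hua h'
            have hvs0 : v ∉ st.2.1 := by
              intro h
              rcases (hmemS v).1 h with h' | h'
              · exact hvs (sr v (sd v (by rw [hdrop] at *; exact h')))
              · exact hva h'
            obtain ⟨hsum, hdiff⟩ := hH3 u huk v hvk hus0 hvs0
            exact ⟨rr _ (rd _ hsum), hdiff.imp_left (fun h => rr _ (rd _ h))⟩
      -- the measure dropped by exactly one (the pop)
      have hMr : pvMeas str < fuel := by
        have hq : pvMeas str = pvMeas (st.1, st.2.1.dropLast, st.2.2) := by rw [qr, qd]
        have hlen' : st.2.1.length = s0.length + 1 := by rw [hsplit]; simp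
        simp only [pvMeas, hdrop] at hq hM ⊢
        omega
      obtain ⟨kf, hCf, hHf⟩ := ih str Cr hH3r hMr
      have hcomp : pvWhileA (fuel + 1) st.1 st.2.1 st.2.2
          = pvWhileA fuel str.1 str.2.1 str.2.2 := by
        rw [pvWhileA_succ, hs]
      rw [hcomp]
      exact ⟨kf, hCf, hHf⟩

-- ===== VERDICT (by name: the statement is the Claim_ definition above) =====
theorem find_all_possible_spec : Claim_equal_find_all_possible := by
  intro known _ hPre
  show find_all_possible known = find_all_possible_alt known
  rcases eq_or_ne known [] with rfl | hne
  · decide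
  · simp only [find_all_possible]
    rw [pvFirstLoop known hPre]
    -- the entry state satisfies the core invariant
    have C0 : pvInvC known (pvInd known, ([] : List Int), known) := by
      refine ⟨pvInd_len known, hPre, fun x hx => hx, ?_, by simp, fun x hx => pvG_dvd_mem known hx⟩
      intro n hn
      rw [pvInd_getD known n hn]
      simp
    obtain ⟨C1, k1, s1, n1, r1, m1, q1⟩ :=
      pvLoop2_fold known known (pvInd known, ([] : List Int), known) C0 (fun a ha => ha)
    set st1 := known.foldl (fun s a => pvMark s (PySem.Int.mod (2 * a) 360))
      (pvInd known, ([] : List Int), known) with hst1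
    obtain ⟨C2, k2, s2, n2, r2, m2, q2⟩ :=
      pvLoop3_fold known (pvComb2 st1.2.2) st1 C1
        (fun pr hpr => pvMem_comb2 st1.2.2 pr hpr)
    set st2 := (pvComb2 st1.2.2).foldl (fun s ab => pvMark3 ab.1 s ab.2) st1 with hst2
    -- all pairs of the input have been combined after the two for-loops
    have hH3 : pvH3 st2 := by
      intro u hu v hv hus hvs
      have hu1 : u ∈ st1.2.2 := by
        rcases n2 u hu with h | h
        · exact h
        · exact absurd h hus
      have hv1 : v ∈ st1.2.2 := by
        rcases n2 v hv with h | h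
        · exact h
        · exact absurd h hvs
      have hu0 : u ∈ known := by
        rcases n1 u hu1 with h | h
        · exact h
        · exact absurd (s2 u h) hus
      have hv0 : v ∈ known := by
        rcases n1 v hv1 with h | h
        · exact h
        · exact absurd (s2 v h) hvs
      by_cases huv : u = v
      · subst huv
        refine ⟨?_, Or.inr rfl⟩
        have := r2 _ (m1 u hu0)
        rwa [two_mul] at this
      · rcases pvComb2_cover st1.2.2 u v hu1 hv1 huv with h | h
        · obtain ⟨hsum, hd1, _⟩ := m2 (u, v) h
          exact ⟨hsum, Or.inl hd1⟩
        · obtain ⟨hsum, _, hd2⟩ := m2 (v, u) h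
          refine ⟨?_, Or.inl hd2⟩
          rwa [add_comm] at hsum
    have hM : pvMeas st2 < 1000000 := by
      have h0 : pvMeas (pvInd known, ([] : List Int), known) ≤ 360 := by
        simp only [pvMeas, List.length_nil]
        have := pvFalseC_le (pvInd known)
        omega
      rw [q2, q1]
      omega
    obtain ⟨kf, Cf, Hf⟩ := pvWhile_main known 1000000 st2 C2 hH3 hM
    obtain ⟨hlenf, hbndf, hK0f, hifff, _, hdvf⟩ := Cf
    have hkfne : kf ≠ [] := by
      rcases List.exists_mem_of_ne_nil known hne with ⟨a, ha⟩
      exact List.ne_nil_of_mem (hK0f a ha)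
    -- the final known list is closed, so its residues are exactly the multiples of pvG
    have hsums : ∀ u ∈ kf, ∀ v ∈ kf, (u + v) % 360 ∈ pvRes kf := by
      intro u hu v hv
      exact (Hf u hu v hv (by simp) (by simp)).1
    have hzero : (0 : Int) ∈ pvRes kf := pvZero_sum hkfne hsums
    have hcl : pvClosed kf := by
      intro u hu v hv
      refine ⟨hsums u hu v hv, ?_⟩
      rcases (Hf u hu v hv (by simp) (by simp)).2 with h | h
      · exact h
      · subst h
        simpa using hzero
    have hiffG := pvMain_iff hne hcl hK0f hdvf
    -- finish: both sides are the indicator of the multiples of pvG known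
    show (pvWhileA 1000000 st2.1 st2.2.1 st2.2.2) = find_all_possible_alt known
    unfold find_all_possible_alt
    rw [if_neg hne]
    apply List.ext_getElem
    · rw [hlenf, List.length_map, PySem.List.length_pyRange_one]
      rfl
    · intro n hn1 hn2
      have hn : n < 360 := by rw [hlenf] at hn1; omega
      rw [List.getElem_map, PySem.List.getElem_pyRange_one, zero_add]
      have hGdef : List.foldl (fun g x => pvGcdLoop g (PySem.Int.mod x 360)) 360 known
          = pvG known := rfl
      rw [hGdef]
      have hdec : decide (PySem.Int.mod (n : Int) (pvG known) = 0)
          = decide (pvG known ∣ (n : Int)) := by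
        rw [decide_eq_decide]
        exact PySem.Int.mod_eq_zero_iff_dvd _ _
      rw [hdec]
      have hiffn := (hifff n hn).trans (hiffG (n : Int) (by omega) (by omega))
      rw [← List.getD_eq_getElem _ false]
      by_cases hg : pvG known ∣ (n : Int)
      · rw [hiffn.2 hg, decide_eq_true hg]
      · have : ¬ ((pvWhileA 1000000 st2.1 st2.2.1 st2.2.2, ([] : List Int), kf).1.getD n false = true) :=
          fun h => hg (hiffn.1 h)
        simp only [] at this
        rw [decide_eq_false hg]
        exact Bool.not_eq_true _ |>.mp this

@[simp]
theorem find_all_possible_raises : Claim_raises_find_all_possible := by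
  unfold Claim_raises_find_all_possible
  exact ⟨fun _ _ h => h, by decide⟩
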